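-- pv_equiv track=rewrite | github.com/SeoYounSeok/python | 프로그래머스 코딩테스트/스택, 큐/기능개발.py | solution
-- ===== SOURCE A (Python) =====
-- def solution(progresses, speeds):
--     answer = []
--     # answer 에 넣어줄 값
--     count = 0
--     # 일자 계산합시다.
--     days = 1
--
--     for i in range(len(progresses)):
--         if i == 0 and progresses[i] + speeds[i] * days >= 100:
--             answer.append(1)
--         elif i > 0 and progresses[i] + speeds[i] * days >= 100:
--             answer[-1] += 1
--         while progresses[i]+speeds[i]*days < 100:
--             days += 1
--             if progresses[i]+speeds[i]*days >= 100:
--                 count = 1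
--                 answer.append(count)
--
--     return answer
-- ===== SOURCE B (Python) =====
-- def solution(progresses, speeds):
--     answer = []
--     release = 0
--     for p, s in zip(progresses, speeds):
--         if answer and p + s * release >= 100:
--             answer[-1] += 1
--         else:
--             release = 1 if p >= 100 else -(-(100 - p) // s)
--             answer.append(1)
--     return answer
-- ===== Notes on version B (the rewrite author's own statement) =====
-- stated objective: simpler
-- what changed: Replaces A's day-by-day simulation (an inner while loop stepping 'days' one unit at a time, plus an index-based special case for the first task) by one grouping pass that tests group membership directly and computes each new group's release day in closed form as the ceiling division -(-(100-p)//s) (day 1 if already complete).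
import Mathlib
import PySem

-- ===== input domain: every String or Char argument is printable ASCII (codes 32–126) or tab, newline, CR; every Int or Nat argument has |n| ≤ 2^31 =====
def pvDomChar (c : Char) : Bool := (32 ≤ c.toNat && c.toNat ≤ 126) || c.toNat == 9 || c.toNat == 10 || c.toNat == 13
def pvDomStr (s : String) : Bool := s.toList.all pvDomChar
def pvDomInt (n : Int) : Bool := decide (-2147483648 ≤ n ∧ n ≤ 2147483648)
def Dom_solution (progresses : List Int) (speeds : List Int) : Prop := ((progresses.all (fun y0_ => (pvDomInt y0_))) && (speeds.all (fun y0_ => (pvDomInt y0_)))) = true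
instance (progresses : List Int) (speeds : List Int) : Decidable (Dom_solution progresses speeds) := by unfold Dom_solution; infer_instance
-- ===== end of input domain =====

-- B replaces A's day-by-day while-loop simulation with a direct group-membership test
-- and a closed-form release day for each new group (objective: simpler).

-- ===== PORT A =====
-- answer[-1] += 1  (only reached with a nonempty answer)
def incLast : List Int → List Int
  | [] => []
  | [x] => [x + 1]
  | x :: xs => x :: incLast xs

-- the inner 'while progresses[i]+speeds[i]*days < 100' loop; the fuel argument only
-- makes the recursion total and is sufficient wherever the Python loop terminates
def wloop (p s : Int) : Nat → Int → List Int → Int → Int × List Int × Int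
  | 0, days, ans, count => (days, ans, count)
  | fuel + 1, days, ans, count =>
    if p + s * days < 100 then
      let days' := days + 1
      if p + s * days' ≥ 100 then wloop p s fuel days' (ans ++ [1]) 1
      else wloop p s fuel days' ans count
    else (days, ans, count)

-- the main 'for i in range(len(progresses))' loop, consuming the indexed pairs
def aloop : Nat → List (Int × Int) → List Int → Int → Int → List Int
  | _, [], ans, _, _ => ans
  | i, (p, s) :: rest, ans, count, days =>
    let ans1 := if i = 0 ∧ p + s * days ≥ 100 then ans ++ [1]
                else if 0 < i ∧ p + s * days ≥ 100 then incLast ans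
                else ans
    let r := wloop p s (100 - (p + s * days)).toNat days ans1 count
    aloop (i + 1) rest r.2.1 r.2.2 r.1

def solution (progresses : List Int) (speeds : List Int) : List Int :=
  aloop 0 (progresses.zip speeds) [] 0 1

-- ===== PORT B =====
def bloop : List (Int × Int) → List Int → Int → List Int
  | [], ans, _ => ans
  | (p, s) :: rest, ans, release =>
    if ans ≠ [] ∧ p + s * release ≥ 100 then bloop rest (incLast ans) release
    else bloop rest (ans ++ [1]) (if p ≥ 100 then 1 else -(PySem.Int.floordiv (-(100 - p)) s))

def solution_alt (progresses : List Int) (speeds : List Int) : List Int :=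
  bloop (progresses.zip speeds) [] 0

-- ===== PRECONDITION & SPEC =====
-- the closed-form completion day of a single task (ceiling division), used by Pre_
def ceilDay (p s : Int) : Int := -(PySem.Int.floordiv (-(100 - p)) s)

-- Pre_ is EXACTLY the set of inputs on which A returns: speeds must cover progresses
-- (A raises IndexError otherwise), and a task with nonpositive speed must already be
-- complete on every day A's running day counter can have reached (day 1 and the
-- closed-form completion day of each earlier positive-speed task) — otherwise A's
-- inner while loop never terminates. Pre_ excludes no input on which A returns.
def Pre_solution (progresses : List Int) (speeds : List Int) : Prop :=
  progresses.length ≤ speeds.length ∧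
    ∀ i < progresses.length, 1 ≤ speeds.getD i 0 ∨
      (100 ≤ progresses.getD i 0 + speeds.getD i 0 ∧
        ∀ j < i, 1 ≤ speeds.getD j 0 →
          100 ≤ progresses.getD i 0 +
            speeds.getD i 0 * ceilDay (progresses.getD j 0) (speeds.getD j 0))
instance (progresses : List Int) (speeds : List Int) : Decidable (Pre_solution progresses speeds) := by unfold Pre_solution; infer_instance

def pvWitness_solution : List Int × List Int := ([93, 30, 55], [1, 30, 5])

def Spec_solution (progresses : List Int) (speeds : List Int) (out : List Int) : Prop := out = solution_alt progresses speeds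
instance (progresses : List Int) (speeds : List Int) (out : List Int) : Decidable (Spec_solution progresses speeds out) := by unfold Spec_solution; infer_instance

-- ===== CLAIM (what is proved, stated in full; the proofs are below) =====
def Claim_equal_solution : Prop := ∀ (progresses : List Int) (speeds : List Int), Dom_solution progresses speeds → Pre_solution progresses speeds → Spec_solution progresses speeds (solution progresses speeds)

-- ===== LEMMAS AND PROOFS =====

lemma ceilDay_bounds (p s : Int) (hs : 1 ≤ s) :
    100 - p ≤ s * ceilDay p s ∧ s * (ceilDay p s - 1) < 100 - p := by
  have h := (PySem.Int.neg_floordiv_neg_eq_iff_of_pos (a := 100 - p) (b := s)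
      (q := ceilDay p s) (by omega)).mp rfl
  constructor <;> nlinarith [h.1, h.2]

lemma cond_iff_ceilDay_le (p s days : Int) (hs : 1 ≤ s) :
    (p + s * days ≥ 100) ↔ ceilDay p s ≤ days := by
  obtain ⟨h1, h2⟩ := ceilDay_bounds p s hs
  constructor
  · intro h; by_contra hlt
    have hdle : days ≤ ceilDay p s - 1 := by omega
    nlinarith [mul_le_mul_of_nonneg_left hdle (by omega : (0:Int) ≤ s)]
  · intro h
    nlinarith [mul_le_mul_of_nonneg_left h (by omega : (0:Int) ≤ s)]

lemma ceilDay_pos (p s : Int) (hs : 1 ≤ s) (hp : p < 100) : 1 ≤ ceilDay p s := by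
  obtain ⟨h1, h2⟩ := ceilDay_bounds p s hs
  by_contra hc
  nlinarith [mul_le_mul_of_nonneg_left (by omega : ceilDay p s ≤ 0) (by omega : (0:Int) ≤ s)]

lemma incLast_ne_nil (l : List Int) (h : l ≠ []) : incLast l ≠ [] := by
  cases l with
  | nil => exact absurd rfl h
  | cons x xs => cases xs <;> simp [incLast]

lemma wloop_exit (p s : Int) (fuel : Nat) (days : Int) (ans : List Int) (count : Int)
    (h : ¬ p + s * days < 100) :
    wloop p s fuel days ans count = (days, ans, count) := by
  cases fuel <;> simp [wloop, h]

lemma wloop_run (p s : Int) (hs : 1 ≤ s) :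
    ∀ (fuel : Nat) (days : Int) (ans : List Int) (count : Int),
      days < ceilDay p s → (ceilDay p s - days).toNat ≤ fuel →
      wloop p s fuel days ans count = (ceilDay p s, ans ++ [1], 1) := by
  intro fuel
  induction fuel with
  | zero => intro days ans count hd hf; omega
  | succ f ih =>
    intro days ans count hd hf
    have hcond : p + s * days < 100 := by
      by_contra hc
      exact absurd ((cond_iff_ceilDay_le p s days hs).mp (by omega)) (by omega)
    by_cases hdone : p + s * (days + 1) ≥ 100
    · have : ceilDay p s ≤ days + 1 := (cond_iff_ceilDay_le p s (days + 1) hs).mp hdone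
      have heq : days + 1 = ceilDay p s := by omega
      simp only [wloop, if_pos hcond, if_pos hdone]
      rw [heq, wloop_exit]
      rw [heq] at hdone; omega
    · have hlt : days + 1 < ceilDay p s := by
        have := (cond_iff_ceilDay_le p s (days + 1) hs).not.mp hdone
        omega
      simp only [wloop, if_pos hcond, if_neg hdone]
      exact ih (days + 1) ans count hlt (by omega)

lemma fuel_enough (p s days : Int) (hs : 1 ≤ s) (_hd : 1 ≤ days) (hlt : days < ceilDay p s) :
    (ceilDay p s - days).toNat ≤ (100 - (p + s * days)).toNat := by
  obtain ⟨h1, h2⟩ := ceilDay_bounds p s hs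
  have key : ceilDay p s - days ≤ 100 - (p + s * days) := by
    nlinarith [mul_le_mul_of_nonneg_left (by omega : days ≤ ceilDay p s - 1) (by omega : (0:Int) ≤ s)]
  omega

-- B's new-group day equals A's while-loop result for a not-yet-complete positive-speed task
lemma newday_eq (p s days : Int) (hs : 1 ≤ s) (hd : 1 ≤ days) (hcond : ¬ p + s * days ≥ 100) :
    (if p ≥ 100 then (1:Int) else -(PySem.Int.floordiv (-(100 - p)) s)) = ceilDay p s := by
  have hp : p < 100 := by
    have h1 : (1:Int) * 1 ≤ s * days := mul_le_mul hs hd (by omega) (by omega)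
    omega
  rw [if_neg (by omega)]; rfl

-- the running invariant: relative to the current day d, every remaining task either has
-- positive speed or is complete on day d and on every earlier positive-speed ceiling day
def Q (d : Int) (l : List (Int × Int)) : Prop :=
  ∀ i < l.length, 1 ≤ (l.getD i (0, 0)).2 ∨
    (100 ≤ (l.getD i (0, 0)).1 + (l.getD i (0, 0)).2 * d ∧
      ∀ j < i, 1 ≤ (l.getD j (0, 0)).2 →
        100 ≤ (l.getD i (0, 0)).1 +
          (l.getD i (0, 0)).2 * ceilDay (l.getD j (0, 0)).1 (l.getD j (0, 0)).2)

lemma Q_tail_same (p s d : Int) (rest : List (Int × Int))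
    (h : Q d ((p, s) :: rest)) : Q d rest := by
  intro i hi
  rcases h (i + 1) (by simp; omega) with h1 | ⟨h2, h3⟩
  · left; simpa using h1
  · right
    refine ⟨by simpa using h2, fun j hj hjs => ?_⟩
    have := h3 (j + 1) (by omega) (by simpa using hjs)
    simpa using this

lemma Q_tail_new (p s d : Int) (rest : List (Int × Int)) (hs : 1 ≤ s)
    (h : Q d ((p, s) :: rest)) : Q (ceilDay p s) rest := by
  intro i hi
  rcases h (i + 1) (by simp; omega) with h1 | ⟨h2, h3⟩
  · left; simpa using h1
  · right
    constructor
    · have := h3 0 (by omega) (by simpa using hs)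
      simpa using this
    · intro j hj hjs
      have := h3 (j + 1) (by omega) (by simpa using hjs)
      simpa using this

-- after the first group exists, A's loop and B's loop coincide under the invariant
lemma main_eq : ∀ (l : List (Int × Int)) (i : Nat) (ans : List Int) (count d : Int),
    ans ≠ [] → 1 ≤ d → Q d l →
    aloop (i + 1) l ans count d = bloop l ans d := by
  intro l
  induction l with
  | nil => intro i ans count d _ _ _; rfl
  | cons pr rest ih =>
    obtain ⟨p, s⟩ := pr
    intro i ans count d hans hd hQ
    by_cases hcond : p + s * d ≥ 100
    · simp only [aloop, bloop, if_neg (by omega : ¬ (i + 1 = 0 ∧ p + s * d ≥ 100)),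
        if_pos (⟨by omega, hcond⟩ : 0 < i + 1 ∧ p + s * d ≥ 100),
        wloop_exit p s _ d _ count (by omega),
        if_pos (⟨hans, hcond⟩ : ans ≠ [] ∧ p + s * d ≥ 100)]
      exact ih (i + 1) (incLast ans) count d (incLast_ne_nil ans hans) hd
        (Q_tail_same p s d rest hQ)
    · have hs : 1 ≤ s := by
        rcases hQ 0 (by simp) with h1 | ⟨h2, _⟩
        · simpa using h1
        · exact absurd (by simpa using h2) hcond
      have hlt : d < ceilDay p s := by
        have := (cond_iff_ceilDay_le p s d hs).not.mp hcond
        omega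
      simp only [aloop, bloop, if_neg (by omega : ¬ (i + 1 = 0 ∧ p + s * d ≥ 100)),
        if_neg (by omega : ¬ (0 < i + 1 ∧ p + s * d ≥ 100)),
        wloop_run p s hs _ d ans count hlt (fuel_enough p s d hs hd hlt),
        if_neg (show ¬ (ans ≠ [] ∧ p + s * d ≥ 100) from fun h => hcond h.2),
        newday_eq p s d hs hd hcond]
      exact ih (i + 1) (ans ++ [1]) 1 (ceilDay p s) (by simp)
        (by have := ceilDay_pos p s hs; omega)
        (Q_tail_new p s d rest hs hQ)

-- handling the first task (A's i == 0 branch; B's empty-answer branch)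
lemma start_eq (l : List (Int × Int)) (hQ : Q 1 l) :
    aloop 0 l [] 0 1 = bloop l [] 0 := by
  cases l with
  | nil => rfl
  | cons pr rest =>
    obtain ⟨p, s⟩ := pr
    by_cases hcond : p + s * 1 ≥ 100
    · have hnew : (if p ≥ 100 then (1:Int) else -(PySem.Int.floordiv (-(100 - p)) s)) = 1 := by
        by_cases hp : p ≥ 100
        · rw [if_pos hp]
        · rw [if_neg hp]
          have hs : 1 ≤ s := by
            rcases hQ 0 (by simp) with h1 | ⟨h2, _⟩
            · simpa using h1
            · have : 100 ≤ p + s := by simpa [mul_one] using h2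
              omega
          have hle : ceilDay p s ≤ 1 := (cond_iff_ceilDay_le p s 1 hs).mp hcond
          have hge : 1 ≤ ceilDay p s := ceilDay_pos p s hs (by omega)
          show ceilDay p s = 1
          omega
      simp only [aloop, bloop]
      rw [if_pos (show True ∧ p + s * 1 ≥ 100 from ⟨trivial, hcond⟩),
        wloop_exit p s _ 1 ([] ++ [1]) 0 (by omega),
        if_neg (show ¬ (([] : List Int) ≠ [] ∧ p + s * 0 ≥ 100) from fun h => h.1 rfl), hnew]
      exact main_eq rest 0 ([] ++ [1]) 0 1 (by simp) (by omega)
        (Q_tail_same p s 1 rest hQ)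
    · have hs : 1 ≤ s := by
        rcases hQ 0 (by simp) with h1 | ⟨h2, _⟩
        · simpa using h1
        · exact absurd (by simpa using h2) hcond
      have hlt : (1:Int) < ceilDay p s := by
        have := (cond_iff_ceilDay_le p s 1 hs).not.mp hcond
        omega
      simp only [aloop, bloop]
      rw [if_neg (show ¬ (True ∧ p + s * 1 ≥ 100) from fun h => hcond h.2),
        if_neg (show ¬ ((0:Nat) < 0 ∧ p + s * 1 ≥ 100) from fun h => absurd h.1 (by omega)),
        wloop_run p s hs _ 1 [] 0 hlt (fuel_enough p s 1 hs (by omega) hlt),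
        if_neg (show ¬ (([] : List Int) ≠ [] ∧ p + s * 0 ≥ 100) from fun h => h.1 rfl),
        newday_eq p s 1 hs (by omega) hcond]
      exact main_eq rest 0 ([] ++ [1]) 1 (ceilDay p s) (by simp) (by omega)
        (Q_tail_new p s 1 rest hs hQ)

lemma zip_getD : ∀ (ps ss : List Int) (k : Nat), k < (ps.zip ss).length →
    (ps.zip ss).getD k (0, 0) = (ps.getD k 0, ss.getD k 0) := by
  intro ps
  induction ps with
  | nil => intro ss k h; simp at h
  | cons p pt ih =>
    intro ss k h
    cases ss with
    | nil => simp at h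
    | cons s st =>
      cases k with
      | zero => simp
      | succ m =>
        simp only [List.zip_cons_cons, List.getD_cons_succ]
        exact ih st m (by simpa using h)

lemma pre_Q (ps ss : List Int) (h : Pre_solution ps ss) : Q 1 (ps.zip ss) := by
  intro i hi
  have hklen : i < ps.length := by
    have := List.length_zip (l₁ := ps) (l₂ := ss)
    omega
  rcases h.2 i hklen with h1 | ⟨h2, h3⟩
  · left; rw [zip_getD ps ss i hi]; exact h1
  · right
    constructor
    · rw [zip_getD ps ss i hi]; simpa [mul_one] using h2
    · intro j hj hjs
      rw [zip_getD ps ss i hi]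
      rw [zip_getD ps ss j (by omega)] at hjs ⊢
      exact h3 j hj hjs

-- ===== VERDICT (by name: the statement is the Claim_ definition above) =====
theorem solution_spec : Claim_equal_solution := by
  intro ps ss _ hpre
  unfold Spec_solution solution solution_alt
  exact start_eq (ps.zip ss) (pre_Q ps ss hpre)
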